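-- pv_equiv track=rewrite | github.com/garybs16/-TwistLock-Custom-File-Encryption-with-GUI | Untitled-1.py | build_index_perm
-- ===== SOURCE A (Python) =====
-- from typing import List, Tuple
--
-- def _lcg32(seed: int) -> int:
--     return (seed * 1664525 + 1013904223) & 0xFFFFFFFF
--
-- def build_index_perm(n: int, seed: int) -> Tuple[List[int], List[int]]:
--     if n <= 1:
--         return list(range(n)), list(range(n))
--     arr = list(range(n))
--     s = seed & 0xFFFFFFFF
--     for i in range(n - 1, 0, -1):
--         s = _lcg32(s)
--         j = s % (i + 1)
--         arr[i], arr[j] = arr[j], arr[i]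
--     inv = [0] * n
--     for i, v in enumerate(arr):
--         inv[v] = i
--     return arr, inv
-- ===== SOURCE B (Python) =====
-- from typing import List, Tuple
--
-- def build_index_perm(n: int, seed: int) -> Tuple[List[int], List[int]]:
--     # Build the swap schedule first, then apply it in REVERSE order to construct
--     # the inverse permutation directly (a reversed sequence of transpositions is
--     # the inverse permutation), and finally derive the forward permutation by
--     # inverting it.
--     if n <= 1:
--         return list(range(n)), list(range(n))
--     s = seed & 0xFFFFFFFF
--     swaps = []
--     for i in range(n - 1, 0, -1):
--         s = (s * 1664525 + 1013904223) & 0xFFFFFFFF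
--         swaps.append((i, s % (i + 1)))
--     inv = list(range(n))
--     for i, j in reversed(swaps):
--         inv[i], inv[j] = inv[j], inv[i]
--     arr = [0] * n
--     for p, v in enumerate(inv):
--         arr[v] = p
--     return arr, inv
-- ===== Notes on version B (the rewrite author's own statement) =====
-- stated objective: alternative
-- what changed: B records the LCG swap schedule first, then applies the transpositions in reverse order to the identity to build the INVERSE permutation directly (a reversed transposition sequence composes to the inverse), and finally derives the forward permutation by inverting it, whereas A mutates the forward array with descending-index swaps and inverts it afterwards.
import Mathlib
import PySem

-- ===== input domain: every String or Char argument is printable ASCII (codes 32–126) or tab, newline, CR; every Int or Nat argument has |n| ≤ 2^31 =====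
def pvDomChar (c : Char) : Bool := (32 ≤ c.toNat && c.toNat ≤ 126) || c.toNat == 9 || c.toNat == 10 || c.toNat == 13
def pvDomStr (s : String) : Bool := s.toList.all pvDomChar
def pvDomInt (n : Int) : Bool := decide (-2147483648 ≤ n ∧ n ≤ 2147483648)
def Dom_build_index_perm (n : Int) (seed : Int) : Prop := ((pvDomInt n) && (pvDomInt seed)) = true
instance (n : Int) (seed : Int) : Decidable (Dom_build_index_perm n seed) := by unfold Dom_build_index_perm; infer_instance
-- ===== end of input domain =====

-- B builds the swap schedule first, applies it in reverse order to construct the inverse permutation directly, then derives the forward array by inverting; same O(n) cost as A.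

-- ===== PORT A =====
def lcg32 (seed : Int) : Int := PySem.Int.band (seed * 1664525 + 1013904223) 0xFFFFFFFF

-- loop body of A's Fisher-Yates shuffle (indices i, j are always in range: 1 ≤ i ≤ n-1, 0 ≤ j ≤ i, so pyGetD/pySetD are exact)
def stepA (st : List Int × Int) (i : Int) : List Int × Int :=
  let s := lcg32 st.2
  let j := PySem.Int.mod s (i + 1)
  let ai := PySem.List.pyGetD st.1 i 0
  let aj := PySem.List.pyGetD st.1 j 0
  (PySem.List.pySetD (PySem.List.pySetD st.1 i aj) j ai, s)

def build_index_perm (n : Int) (seed : Int) : List Int × List Int :=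
  if n ≤ 1 then (PySem.List.pyRange 0 n 1, PySem.List.pyRange 0 n 1)
  else
    let st := (PySem.List.pyRange (n - 1) 0 (-1)).foldl stepA
      (PySem.List.pyRange 0 n 1, PySem.Int.band seed 0xFFFFFFFF)
    let arr := st.1
    let inv := (PySem.List.enumerate arr 0).foldl
      (fun inv (p : Int × Int) => PySem.List.pySetD inv p.2 p.1)
      (List.replicate n.toNat (0 : Int))
    (arr, inv)

-- ===== PORT B =====
-- first loop of B: record the swap schedule (i, s % (i+1)) while stepping the LCG
def genStep (st : List (Int × Int) × Int) (i : Int) : List (Int × Int) × Int :=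
  let s := PySem.Int.band (st.2 * 1664525 + 1013904223) 0xFFFFFFFF
  (st.1 ++ [(i, PySem.Int.mod s (i + 1))], s)

-- second loop of B: one recorded swap applied to the array
def swapStep (a : List Int) (p : Int × Int) : List Int :=
  let x := PySem.List.pyGetD a p.1 0
  let y := PySem.List.pyGetD a p.2 0
  PySem.List.pySetD (PySem.List.pySetD a p.1 y) p.2 x

def build_index_perm_alt (n : Int) (seed : Int) : List Int × List Int :=
  if n ≤ 1 then (PySem.List.pyRange 0 n 1, PySem.List.pyRange 0 n 1)
  else
    let swaps := ((PySem.List.pyRange (n - 1) 0 (-1)).foldl genStep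
      ([], PySem.Int.band seed 0xFFFFFFFF)).1
    let inv := swaps.reverse.foldl swapStep (PySem.List.pyRange 0 n 1)
    let arr := (PySem.List.enumerate inv 0).foldl
      (fun arr (p : Int × Int) => PySem.List.pySetD arr p.2 p.1)
      (List.replicate n.toNat (0 : Int))
    (arr, inv)

-- ===== PRECONDITION & SPEC =====
def Spec_build_index_perm (n : Int) (seed : Int) (out : List Int × List Int) : Prop := out = build_index_perm_alt n seed
instance (n : Int) (seed : Int) (out : List Int × List Int) : Decidable (Spec_build_index_perm n seed out) := by unfold Spec_build_index_perm; infer_instance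

-- ===== CLAIM (what is proved, stated in full; the proofs are below) =====
def Claim_equal_build_index_perm : Prop := ∀ (n : Int) (seed : Int), Dom_build_index_perm n seed → Spec_build_index_perm n seed (build_index_perm n seed)

-- ===== LEMMAS AND PROOFS =====

-- a swap pair with both components in [0, n)
def ValidP (n : Nat) (p : Int × Int) : Prop := 0 ≤ p.1 ∧ p.1 < (n : Int) ∧ 0 ≤ p.2 ∧ p.2 < (n : Int)

-- the Nat-indexed form of one swap
def swapN (a : List Int) (p : Int × Int) : List Int :=
  (a.set p.1.toNat (a.getD p.2.toNat 0)).set p.2.toNat (a.getD p.1.toNat 0)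

def tauN (i j m : Nat) : Nat := if j = m then i else if i = m then j else m

def idn (n : Nat) : List Int := (List.range n).map (Nat.cast : Nat → Int)

-- array holds a function [0,n) → [0,n)
def InRangeP (n : Nat) (a : List Int) : Prop :=
  a.length = n ∧ ∀ k : Nat, k < n → ∃ v : Nat, v < n ∧ a.getD k 0 = (v : Int)

-- a and b are mutually inverse permutation arrays of [0,n)
def MutInv (n : Nat) (a b : List Int) : Prop :=
  InRangeP n a ∧ InRangeP n b ∧
  (∀ k : Nat, k < n → b.getD (a.getD k 0).toNat 0 = (k : Int)) ∧
  (∀ k : Nat, k < n → a.getD (b.getD k 0).toNat 0 = (k : Int))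

lemma getD_set_set {α : Type} (l : List α) (i j k : Nat) (x y : α) (d : α) (hk : k < l.length) :
    ((l.set i x).set j y).getD k d = if j = k then y else if i = k then x else l.getD k d := by
  rw [List.getD_eq_getElem _ _ (by simpa using hk), List.getElem_set, List.getElem_set,
    List.getD_eq_getElem _ _ hk]

lemma swapStep_eq_swapN (a : List Int) (p : Int × Int) (h1 : 0 ≤ p.1) (h2 : 0 ≤ p.2) :
    swapStep a p = swapN a p := by
  simp only [swapStep, swapN, PySem.List.pyGetD_of_nonneg _ _ h1,
    PySem.List.pyGetD_of_nonneg _ _ h2, PySem.List.pySetD_of_nonneg _ _ h1,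
    PySem.List.pySetD_of_nonneg _ _ h2]

lemma length_swapN (a : List Int) (p : Int × Int) : (swapN a p).length = a.length := by
  simp [swapN]

lemma swapN_getD (a : List Int) (p : Int × Int) (k : Nat) (hk : k < a.length) :
    (swapN a p).getD k 0 = a.getD (tauN p.1.toNat p.2.toNat k) 0 := by
  unfold swapN tauN
  rw [getD_set_set a _ _ _ _ _ _ hk]
  split_ifs <;> rfl

lemma tauN_lt {n i j m : Nat} (hi : i < n) (hj : j < n) (hm : m < n) : tauN i j m < n := by
  unfold tauN; split_ifs <;> omega

lemma tauN_tauN (i j m : Nat) : tauN i j (tauN i j m) = m := by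
  unfold tauN; split_ifs <;> omega

lemma idn_getD (n k : Nat) (hk : k < n) : (idn n).getD k 0 = (k : Int) := by
  unfold idn; exact PySem.List.getD_map_range _ _ _ _ hk

lemma idn_length (n : Nat) : (idn n).length = n := by simp [idn]

lemma InRangeP_idn (n : Nat) : InRangeP n (idn n) :=
  ⟨idn_length n, fun k hk => ⟨k, hk, idn_getD n k hk⟩⟩

lemma InRangeP_swapN {n : Nat} {a : List Int} {p : Int × Int} (hp : ValidP n p)
    (h : InRangeP n a) : InRangeP n (swapN a p) := by
  obtain ⟨hl, he⟩ := h
  refine ⟨by rw [length_swapN, hl], fun k hk => ?_⟩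
  rw [swapN_getD a p k (by omega)]
  obtain ⟨h1, h2, h3, h4⟩ := hp
  exact he _ (tauN_lt (by omega) (by omega) hk)

lemma length_fold_swapN (ps : List (Int × Int)) : ∀ a : List Int,
    (ps.foldl swapN a).length = a.length := by
  induction ps with
  | nil => intro a; rfl
  | cons p ps ih => intro a; rw [List.foldl_cons, ih, length_swapN]

lemma InRangeP_fold_swapN {n : Nat} (ps : List (Int × Int)) : ∀ a : List Int,
    (∀ p ∈ ps, ValidP n p) → InRangeP n a → InRangeP n (ps.foldl swapN a) := by
  induction ps with
  | nil => intro a _ h; exact h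
  | cons p ps ih =>
    intro a hv h
    exact ih _ (fun q hq => hv q (List.mem_cons_of_mem _ hq))
      (InRangeP_swapN (hv p (List.mem_cons_self ..)) h)

-- folding swaps from an arbitrary array = composing with the fold from the identity
lemma fold_compose {n : Nat} (ps : List (Int × Int)) : ∀ a : List Int, a.length = n →
    (∀ p ∈ ps, ValidP n p) → ∀ k : Nat, k < n →
    (ps.foldl swapN a).getD k 0 = a.getD ((ps.foldl swapN (idn n)).getD k 0).toNat 0 := by
  induction ps with
  | nil =>
    intro a ha _ k hk
    simp only [List.foldl_nil, idn_getD n k hk, Int.toNat_natCast]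
  | cons p ps ih =>
    intro a ha hv k hk
    have hvp := hv p (List.mem_cons_self ..)
    have hvt : ∀ q ∈ ps, ValidP n q := fun q hq => hv q (List.mem_cons_of_mem _ hq)
    obtain ⟨m, hm, hmeq⟩ :=
      (InRangeP_fold_swapN ps (idn n) hvt (InRangeP_idn n)).2 k hk
    rw [List.foldl_cons, List.foldl_cons,
      ih (swapN a p) (by rw [length_swapN, ha]) hvt k hk,
      ih (swapN (idn n) p) (by rw [length_swapN, idn_length]) hvt k hk,
      hmeq, Int.toNat_natCast,
      swapN_getD a p m (by omega),
      swapN_getD (idn n) p m (by rw [idn_length]; exact hm)]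
    obtain ⟨h1, h2, h3, h4⟩ := hvp
    rw [idn_getD n _ (tauN_lt (by omega) (by omega) hm), Int.toNat_natCast]

lemma MutInv_symm {n : Nat} {a b : List Int} (h : MutInv n a b) : MutInv n b a :=
  ⟨h.2.1, h.1, h.2.2.2, h.2.2.1⟩

-- the reversed swap sequence builds the inverse permutation
lemma rev_inverse {n : Nat} (ps : List (Int × Int)) (hv : ∀ p ∈ ps, ValidP n p) :
    MutInv n (ps.foldl swapN (idn n)) (ps.reverse.foldl swapN (idn n)) := by
  induction ps using List.reverseRecOn with
  | nil =>
    refine ⟨InRangeP_idn n, InRangeP_idn n, ?_, ?_⟩ <;>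
      (intro k hk
       simp only [List.reverse_nil, List.foldl_nil]
       rw [idn_getD n k hk, Int.toNat_natCast, idn_getD n k hk])
  | append_singleton M p ihM =>
    have hvp : ValidP n p := hv p (by simp)
    have hvM : ∀ q ∈ M, ValidP n q := fun q hq => hv q (by simp [hq])
    have hvMr : ∀ q ∈ M.reverse, ValidP n q := fun q hq => hvM q (List.mem_reverse.1 hq)
    obtain ⟨⟨hlaM, heaM⟩, ⟨hlbM, hebM⟩, h3, h4⟩ := ihM hvM
    obtain ⟨hp1, hp2, hp3, hp4⟩ := id hvp
    set i := p.1.toNat with hi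
    set j := p.2.toNat with hj
    have hiN : i < n := by omega
    have hjN : j < n := by omega
    set aM := M.foldl swapN (idn n) with haM
    set bM := M.reverse.foldl swapN (idn n) with hbM
    have ha : (M ++ [p]).foldl swapN (idn n) = swapN aM p := by
      rw [List.foldl_append]; rfl
    have hb : ((M ++ [p]).reverse.foldl swapN (idn n)) =
        M.reverse.foldl swapN (swapN (idn n) p) := by
      rw [List.reverse_append]; rfl
    -- pointwise description of the b side
    have hbget : ∀ k : Nat, k < n →
        (M.reverse.foldl swapN (swapN (idn n) p)).getD k 0
          = (tauN i j (bM.getD k 0).toNat : Int) := by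
      intro k hk
      obtain ⟨m, hm, hmeq⟩ := hebM k hk
      rw [fold_compose M.reverse (swapN (idn n) p)
        (by rw [length_swapN, idn_length]) hvMr k hk, ← hbM, hmeq, Int.toNat_natCast,
        swapN_getD (idn n) p m (by rw [idn_length]; exact hm),
        idn_getD n _ (tauN_lt hiN hjN hm)]
    have haget : ∀ k : Nat, k < n →
        (swapN aM p).getD k 0 = aM.getD (tauN i j k) 0 := by
      intro k hk
      exact swapN_getD aM p k (by rw [hlaM]; exact hk)
    rw [ha, hb]
    have hIRa : InRangeP n (M.reverse.foldl swapN (swapN (idn n) p)) :=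
      InRangeP_fold_swapN _ _ hvMr (InRangeP_swapN hvp (InRangeP_idn n))
    refine ⟨InRangeP_swapN hvp ⟨hlaM, heaM⟩, hIRa, ?_, ?_⟩
    · intro k hk
      rw [haget k hk]
      obtain ⟨v, hvn, hveq⟩ := heaM (tauN i j k) (tauN_lt hiN hjN hk)
      rw [hveq, Int.toNat_natCast, hbget v hvn]
      have := h3 (tauN i j k) (tauN_lt hiN hjN hk)
      rw [hveq, Int.toNat_natCast] at this
      rw [this, Int.toNat_natCast, tauN_tauN]
    · intro k hk
      rw [hbget k hk]
      obtain ⟨m, hm, hmeq⟩ := hebM k hk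
      rw [hmeq, Int.toNat_natCast, Int.toNat_natCast,
        haget (tauN i j m) (tauN_lt hiN hjN hm), tauN_tauN]
      have := h4 k hk
      rw [hmeq, Int.toNat_natCast] at this
      exact this

-- generated swap pairs are in range
lemma gen_valid {n : Nat} (L : List Int) : ∀ (sw : List (Int × Int)) (s : Int),
    (∀ i ∈ L, 0 < i ∧ i < (n : Int)) → (∀ p ∈ sw, ValidP n p) →
    ∀ p ∈ (L.foldl genStep (sw, s)).1, ValidP n p := by
  induction L with
  | nil => intro sw s _ hsw p hp; exact hsw p hp
  | cons i L ih =>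
    intro sw s hL hsw p hp
    obtain ⟨hi0, hiN⟩ := hL i (List.mem_cons_self ..)
    refine ih _ _ (fun x hx => hL x (List.mem_cons_of_mem _ hx)) ?_ p hp
    intro q hq
    rcases List.mem_append.1 hq with h | h
    · exact hsw q h
    · have : q = (i, PySem.Int.mod (PySem.Int.band (s * 1664525 + 1013904223) 0xFFFFFFFF) (i + 1)) := by
        simpa using h
      subst this
      refine ⟨by omega, by omega, PySem.Int.mod_nonneg _ (by omega), ?_⟩
      have := PySem.Int.mod_lt (PySem.Int.band (s * 1664525 + 1013904223) 0xFFFFFFFF) (b := i + 1) (by omega)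
      omega

-- A's stateful shuffle loop = replaying the recorded schedule
lemma gen_eq (L : List Int) : ∀ (sw : List (Int × Int)) (arr : List Int) (s : Int),
    ((L.foldl genStep (sw, s)).1).foldl swapStep arr
      = (L.foldl stepA (sw.foldl swapStep arr, s)).1 := by
  induction L with
  | nil => intro sw arr s; rfl
  | cons i L ih =>
    intro sw arr s
    rw [List.foldl_cons, List.foldl_cons]
    have hstep : stepA (sw.foldl swapStep arr, s) i =
        ((sw ++ [(i, PySem.Int.mod (PySem.Int.band (s * 1664525 + 1013904223) 0xFFFFFFFF) (i + 1))]).foldl swapStep arr,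
         PySem.Int.band (s * 1664525 + 1013904223) 0xFFFFFFFF) := by
      rw [List.foldl_append]
      rfl
    rw [hstep]
    exact ih _ arr _

lemma foldl_swapStep_eq_swapN (ps : List (Int × Int)) {n : Nat}
    (hv : ∀ p ∈ ps, ValidP n p) (a : List Int) :
    ps.foldl swapStep a = ps.foldl swapN a := by
  refine PySem.List.foldl_congr_mem' _ _ _ _ ?_
  intro p hp acc
  obtain ⟨h1, _, h3, _⟩ := hv p hp
  exact swapStep_eq_swapN acc p h1 h3

lemma foldl_enum_set_length (arr : List Int) : ∀ (s : Int) (init : List Int),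
    ((PySem.List.enumerate arr s).foldl
      (fun acc (p : Int × Int) => PySem.List.pySetD acc p.2 p.1) init).length = init.length := by
  induction arr with
  | nil => intro s init; rfl
  | cons x xs ih =>
    intro s init
    rw [PySem.List.enumerate_cons, List.foldl_cons, ih]
    exact PySem.List.length_pySetD _ _ _

lemma foldl_enum_set_miss (arr : List Int) : ∀ (s : Int) (init : List Int) (v : Nat),
    (∀ x ∈ arr, 0 ≤ x ∧ x ≠ (v : Int)) →
    ((PySem.List.enumerate arr s).foldl
      (fun acc (p : Int × Int) => PySem.List.pySetD acc p.2 p.1) init).getD v 0 = init.getD v 0 := by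
  induction arr with
  | nil => intro s init v _; rfl
  | cons x xs ih =>
    intro s init v h
    obtain ⟨hx0, hxv⟩ := h x (List.mem_cons_self ..)
    rw [PySem.List.enumerate_cons, List.foldl_cons]
    have := ih (s + 1) (PySem.List.pySetD init x s) v
      (fun y hy => h y (List.mem_cons_of_mem _ hy))
    rw [this, PySem.List.pySetD_of_nonneg _ _ hx0,
      List.getD_eq_getElem?_getD, List.getD_eq_getElem?_getD,
      List.getElem?_set_ne (by omega)]

lemma foldl_enum_set_unique (arr : List Int) : ∀ (s : Int) (init : List Int) (v k : Nat),
    v < init.length →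
    k < arr.length → arr.getD k 0 = (v : Int) →
    (∀ m : Nat, m < arr.length → arr.getD m 0 = (v : Int) → m = k) →
    (∀ x ∈ arr, 0 ≤ x) →
    ((PySem.List.enumerate arr s).foldl
      (fun acc (p : Int × Int) => PySem.List.pySetD acc p.2 p.1) init).getD v 0 = s + k := by
  induction arr with
  | nil => intro s init v k _ hk _ _ _; exact absurd hk (by simp)
  | cons x xs ih =>
    intro s init v k hv hk hget huniq hpos
    have hx0 : 0 ≤ x := hpos x (List.mem_cons_self ..)
    rw [PySem.List.enumerate_cons, List.foldl_cons]
    match k with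
    | 0 =>
      have hxv : x = (v : Int) := hget
      have hxs : ∀ y ∈ xs, 0 ≤ y ∧ y ≠ (v : Int) := by
        intro y hy
        refine ⟨hpos y (List.mem_cons_of_mem _ hy), ?_⟩
        intro hyv
        obtain ⟨m, hm, rfl⟩ := List.mem_iff_getElem.1 hy
        have := huniq (m + 1) (by simpa using Nat.succ_lt_succ hm)
          (by simpa [List.getD_cons_succ, List.getElem?_eq_getElem hm] using hyv)
        omega
      rw [foldl_enum_set_miss xs (s + 1) _ v hxs,
        PySem.List.pySetD_of_nonneg _ _ hx0]
      have hvx : x.toNat = v := by omega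
      rw [hvx, List.getD_eq_getElem _ _ (by simpa using hv), List.getElem_set]
      simp
    | k' + 1 =>
      have hxv : x ≠ (v : Int) := by
        intro hxv
        have := huniq 0 (by simp) (by simpa using hxv)
        omega
      have := ih (s + 1) (PySem.List.pySetD init x s) v k'
        (by rw [PySem.List.length_pySetD]; exact hv)
        (by simpa using Nat.lt_of_succ_lt_succ hk)
        (by simpa using hget)
        (fun m hm hgm => by
          have := huniq (m + 1) (by simpa using Nat.succ_lt_succ hm) (by simpa using hgm)
          omega)
        (fun y hy => hpos y (List.mem_cons_of_mem _ hy))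
      rw [this]; push_cast; ring

-- inverting x via the enumerate pass recovers x's inverse partner
lemma invert_eq {n : Nat} {x y : List Int} (h : MutInv n x y) (v : Nat) (hv : v < n) :
    ((PySem.List.enumerate x 0).foldl
      (fun acc (p : Int × Int) => PySem.List.pySetD acc p.2 p.1)
      (List.replicate n (0 : Int))).getD v 0 = y.getD v 0 := by
  obtain ⟨⟨hlx, hex⟩, ⟨hly, hey⟩, h3, h4⟩ := h
  obtain ⟨k, hkn, hkeq⟩ := hey v hv
  have hxk : x.getD k 0 = (v : Int) := by
    have := h4 v hv
    rw [hkeq, Int.toNat_natCast] at this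
    exact this
  have huniq : ∀ m : Nat, m < x.length → x.getD m 0 = (v : Int) → m = k := by
    intro m hm hgm
    have := h3 m (by rw [← hlx]; exact hm)
    rw [hgm, Int.toNat_natCast, hkeq] at this
    exact_mod_cast this.symm
  have hpos : ∀ z ∈ x, (0 : Int) ≤ z := by
    intro z hz
    obtain ⟨m, hm, rfl⟩ := List.mem_iff_getElem.1 hz
    obtain ⟨w, hwn, hw⟩ := hex m (by rw [← hlx]; exact hm)
    rw [List.getD_eq_getElem _ _ hm] at hw
    rw [hw]; exact Int.natCast_nonneg _
  rw [foldl_enum_set_unique x 0 (List.replicate n 0) v k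
    (by rw [List.length_replicate]; exact hv) (by rw [hlx]; exact hkn) hxk huniq hpos,
    hkeq]
  omega

-- ===== VERDICT (by name: the statement is the Claim_ definition above) =====
theorem build_index_perm_spec : Claim_equal_build_index_perm := by
  intro n seed _hD
  unfold Spec_build_index_perm
  by_cases hn : n ≤ 1
  · simp [build_index_perm, build_index_perm_alt, hn]
  · simp only [build_index_perm, build_index_perm_alt, if_neg hn]
    have hn2 : (2 : Int) ≤ n := by omega
    have hNn : ((n.toNat : Int)) = n := by omega
    have hinit : PySem.List.pyRange 0 n 1 = idn n.toNat := by
      rw [PySem.List.pyRange_one]; unfold idn; simp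
    have hL : ∀ i ∈ PySem.List.pyRange (n - 1) 0 (-1), 0 < i ∧ i < ((n.toNat : Int)) := by
      intro i hi
      rw [PySem.List.mem_pyRange_neg_one] at hi
      omega
    set s0 := PySem.Int.band seed 0xFFFFFFFF with hs0
    set ps := ((PySem.List.pyRange (n - 1) 0 (-1)).foldl genStep ([], s0)).1 with hps
    have hvps : ∀ p ∈ ps, ValidP n.toNat p :=
      gen_valid _ [] s0 hL (by intro p hp; exact absurd hp (by simp))
    have hvpsr : ∀ p ∈ ps.reverse, ValidP n.toNat p :=
      fun p hp => hvps p (List.mem_reverse.1 hp)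
    -- A's shuffled array = swapN fold over ps from the identity
    have harrA : ((PySem.List.pyRange (n - 1) 0 (-1)).foldl stepA
        (PySem.List.pyRange 0 n 1, s0)).1 = ps.foldl swapN (idn n.toNat) := by
      have h := gen_eq (PySem.List.pyRange (n - 1) 0 (-1)) [] (PySem.List.pyRange 0 n 1) s0
      simp only [List.foldl_nil] at h
      rw [← hps] at h
      rw [← h, foldl_swapStep_eq_swapN ps hvps, hinit]
    -- B's inv = swapN fold over ps.reverse from the identity
    have hinvB : ps.reverse.foldl swapStep (PySem.List.pyRange 0 n 1)
        = ps.reverse.foldl swapN (idn n.toNat) := by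
      rw [foldl_swapStep_eq_swapN ps.reverse hvpsr, hinit]
    have hMI : MutInv n.toNat (ps.foldl swapN (idn n.toNat))
        (ps.reverse.foldl swapN (idn n.toNat)) := rev_inverse ps hvps
    set aA := ps.foldl swapN (idn n.toNat) with haA
    set bB := ps.reverse.foldl swapN (idn n.toNat) with hbB
    have hlaA : aA.length = n.toNat := by
      rw [haA, length_fold_swapN, idn_length]
    have hlbB : bB.length = n.toNat := by
      rw [hbB, length_fold_swapN, idn_length]
    rw [harrA, hinvB, Prod.mk.injEq]
    constructor
    · -- A's arr = B's arr (the invert of bB)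
      apply List.ext_getElem
      · rw [foldl_enum_set_length, List.length_replicate, hlaA]
      · intro v h1 h2
        have hvN : v < n.toNat := by rwa [hlaA] at h1
        have := invert_eq (MutInv_symm hMI) v hvN
        rw [← List.getD_eq_getElem _ 0 h1, ← List.getD_eq_getElem _ 0 h2, this]
    · -- A's inv (the invert of aA) = B's inv
      apply List.ext_getElem
      · rw [foldl_enum_set_length, List.length_replicate, hlbB]
      · intro v h1 h2
        have hvN : v < n.toNat := by
          rw [foldl_enum_set_length, List.length_replicate] at h1; exact h1
        have := invert_eq hMI v hvN
        rw [← List.getD_eq_getElem _ 0 h1, ← List.getD_eq_getElem _ 0 h2, this]
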